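-- pv_equiv track=rewrite | github.com/cpwoo/CodeTest | programmers/etc/level1/과일_장수.py | solution
-- ===== SOURCE A (Python) =====
-- def solution(k, m, score):
--     answer = 0
--     score.sort(reverse=True)
--     for i in range(0, len(score), m):
--         tmp = score[i:i+m]
--         if len(tmp) == m:
--             answer += tmp[m-1]*m
--     return answer
-- ===== SOURCE B (Python) =====
-- def solution(k, m, score):
--     if m <= 0:
--         return 0
--     cnt = {}
--     for v in score:
--         cnt[v] = cnt.get(v, 0) + 1
--     full = (len(score) // m) * m
--     answer = 0
--     pos = 0
--     for v in sorted(cnt, reverse=True):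
--         nxt = pos + cnt[v]
--         end = min(nxt, full)
--         if end > pos:
--             answer += v * m * (end // m - pos // m)
--         pos = nxt
--     return answer
-- ===== Notes on version B (the rewrite author's own statement) =====
-- stated objective: alternative
-- what changed: B replaces A's sort-then-slice-blocks scan with a frequency dictionary: it counts occurrences per score value, sorts only the distinct values descending, and for each value-run computes its contribution to block minima arithmetically (number of block boundaries inside the run via floor division), never materializing the sorted list or slicing blocks.
import Mathlib
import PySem

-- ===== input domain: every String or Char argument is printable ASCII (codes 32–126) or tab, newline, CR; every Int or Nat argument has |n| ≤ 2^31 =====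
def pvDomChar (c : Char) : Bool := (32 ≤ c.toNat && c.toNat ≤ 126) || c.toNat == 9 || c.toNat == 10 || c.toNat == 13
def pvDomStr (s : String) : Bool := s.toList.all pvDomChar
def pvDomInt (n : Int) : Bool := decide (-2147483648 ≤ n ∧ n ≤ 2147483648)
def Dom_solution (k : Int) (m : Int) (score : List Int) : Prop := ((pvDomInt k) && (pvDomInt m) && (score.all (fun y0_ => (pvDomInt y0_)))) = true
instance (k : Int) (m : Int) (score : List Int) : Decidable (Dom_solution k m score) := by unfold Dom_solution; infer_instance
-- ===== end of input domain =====

-- B replaces A's descending sort + per-block slicing with a frequency dictionary over score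
-- values: sort only the DISTINCT values descending and add each value-run's block-minimum
-- contribution arithmetically (alternative decomposition; not measured faster).
-- A mutates `score` in place (sorts it descending); B does not — the equivalence proved is about the return value only.


-- ===== PORT A =====
def solution (k : Int) (m : Int) (score : List Int) : Int :=
  let s := PySem.List.sorted score (fun x => x) true
  (PySem.List.pyRange 0 (s.length : Int) m).foldl
    (fun answer i =>
      let tmp := PySem.List.slice s (some i) (some (i + m))
      if (tmp.length : Int) = m then answer + PySem.List.pyGetD tmp (m - 1) 0 * m
      else answer) 0

-- ===== PORT B =====
def solution_alt (k : Int) (m : Int) (score : List Int) : Int :=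
  if m ≤ 0 then 0
  else
    let cnt := score.foldl (fun d v => PySem.Dict.insert d v (PySem.Dict.getD d v 0 + 1)) PySem.Dict.empty
    let full := PySem.Int.floordiv (score.length : Int) m * m
    let st := (PySem.List.sorted (PySem.Dict.keys cnt) (fun x => x) true).foldl
      (fun (st : Int × Int) v =>
        let nxt := st.2 + PySem.Dict.getD cnt v 0
        let e := min nxt full
        if st.2 < e then (st.1 + v * m * (PySem.Int.floordiv e m - PySem.Int.floordiv st.2 m), nxt)
        else (st.1, nxt)) ((0 : Int), (0 : Int))
    st.1

-- ===== PRECONDITION & SPEC =====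
-- Pre_ excludes exactly m = 0, where the Python A raises ValueError (range() step 0).
def Pre_solution (k : Int) (m : Int) (score : List Int) : Prop := m ≠ 0
instance (k : Int) (m : Int) (score : List Int) : Decidable (Pre_solution k m score) := by unfold Pre_solution; infer_instance
def pvWitness_solution : Int × Int × List Int := (4, 3, [4, 1, 3, 1, 2, 2, 1])

def Spec_solution (k : Int) (m : Int) (score : List Int) (out : Int) : Prop := out = solution_alt k m score
instance (k : Int) (m : Int) (score : List Int) (out : Int) : Decidable (Spec_solution k m score out) := by unfold Spec_solution; infer_instance

-- ===== CLAIM (what is proved, stated in full; the proofs are below) =====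
def Claim_equal_solution : Prop := ∀ (k : Int) (m : Int) (score : List Int), Dom_solution k m score → Pre_solution k m score → Spec_solution k m score (solution k m score)

-- ===== LEMMAS AND PROOFS =====

-- sorted(xs, reverse=True) on ints is the reverse of sorted(xs)
theorem pv_sorted_rev_eq_reverse (xs : List Int) :
    PySem.List.sorted xs (fun x => x) true = (PySem.List.sorted xs (fun x => x) false).reverse := by
  refine List.Perm.eq_of_pairwise (le := fun a b : Int => b ≤ a)
    (fun a b _ _ h1 h2 => le_antisymm h2 h1)
    (PySem.List.sorted_pairwise_rev xs (fun x => x))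
    ?_ ?_
  · rw [List.pairwise_reverse]; exact PySem.List.sorted_pairwise xs _
  · exact ((PySem.List.sorted_perm xs _ true).trans
      ((PySem.List.sorted_perm xs _ false).symm)).trans (List.reverse_perm _).symm

-- a foldl that conditionally adds is init + a sum of ite-terms
theorem pv_foldl_ite_add {β : Type} (l : List β) (p : β → Prop) [DecidablePred p] (g : β → Int) (init : Int) :
    l.foldl (fun acc x => if p x then acc + g x else acc) init
      = init + (l.map (fun x => if p x then g x else 0)).sum := by
  induction l generalizing init with
  | nil => simp
  | cons x l ih => simp only [List.foldl_cons, List.map_cons, List.sum_cons, ih]; split_ifs <;> ring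

-- the element A reads from block t of the descending list
theorem pv_term_eq (d : List Int) (mn t : Nat) (hmn : 0 < mn) (h : mn * (t + 1) ≤ d.length) :
    (List.take mn (List.drop (mn * t) d)).getD (mn - 1) 0 = d.getD (mn * t + (mn - 1)) 0 := by
  have hmt : mn * (t + 1) = mn * t + mn := by ring
  have hlen : (List.take mn (List.drop (mn * t) d)).length = mn := by
    simp [List.length_take, List.length_drop]; omega
  have h1 : mn - 1 < (List.take mn (List.drop (mn * t) d)).length := by omega
  have h2 : mn * t + (mn - 1) < d.length := by omega
  rw [List.getD_eq_getElem _ _ h1, List.getD_eq_getElem _ _ h2]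
  rw [List.getElem_take, List.getElem_drop]

-- A's loop equals mn times the sum of the minimum entry of each full block of the descending list
theorem pvA_sum (d : List Int) (mn : Nat) (hmn : 0 < mn) :
    (PySem.List.pyRange 0 (d.length : Int) (mn : Int)).foldl
      (fun answer i =>
        if ((PySem.List.slice d (some i) (some (i + (mn : Int)))).length : Int) = (mn : Int) then
          answer + PySem.List.pyGetD (PySem.List.slice d (some i) (some (i + (mn : Int)))) ((mn : Int) - 1) 0 * (mn : Int)
        else answer) 0
    = (mn : Int) * ((List.range (d.length / mn)).map (fun t => d.getD (mn * t + (mn - 1)) 0)).sum := by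
  have hmpos : (0:Int) < (mn:Int) := by exact_mod_cast hmn
  set N := d.length with hN
  set q := N / mn with hq
  have hdm := Nat.div_add_mod N mn
  have hmod := Nat.mod_lt N hmn
  rw [← hq] at hdm
  rw [PySem.List.pyRange_of_pos _ _ hmpos]
  rw [List.foldl_map]
  rw [pv_foldl_ite_add (p := fun t : Nat =>
        ((PySem.List.slice d (some ((0:Int) + (mn:Int)*(t:Int))) (some ((0:Int) + (mn:Int)*(t:Int) + (mn:Int)))).length : Int) = (mn:Int))
      (g := fun t : Nat => PySem.List.pyGetD (PySem.List.slice d (some ((0:Int) + (mn:Int)*(t:Int))) (some ((0:Int) + (mn:Int)*(t:Int) + (mn:Int)))) ((mn:Int)-1) 0 * (mn:Int))]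
  set c := (if (0:Int) < (N:Int) then (((N:Int) - 0 + (mn:Int) - 1)/(mn:Int)).toNat else 0) with hc
  have hqc : q ≤ c := by
    rcases Nat.eq_zero_or_pos N with h0 | h0
    · simp [hq, h0]
    · have hNpos : (0:Int) < (N:Int) := by exact_mod_cast h0
      rw [hc, if_pos hNpos]
      have h1 : ((q:Int)) ≤ ((N:Int) - 0 + (mn:Int) - 1)/(mn:Int) := by
        have h2 : ((N:Int)) / (mn:Int) = (q:Int) := by
          rw [hq]; exact_mod_cast (Int.natCast_div N mn).symm
        rw [← h2]
        apply Int.ediv_le_ediv hmpos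
        omega
      omega
  rw [show c = q + (c - q) from (Nat.add_sub_cancel' hqc).symm, List.range_add,
      List.map_append, List.sum_append, List.map_map]
  have htail : ((List.range (c - q)).map ((fun t : Nat => if ((PySem.List.slice d (some ((0:Int) + (mn:Int)*(t:Int))) (some ((0:Int) + (mn:Int)*(t:Int) + (mn:Int)))).length : Int) = (mn:Int) then PySem.List.pyGetD (PySem.List.slice d (some ((0:Int) + (mn:Int)*(t:Int))) (some ((0:Int) + (mn:Int)*(t:Int) + (mn:Int)))) ((mn:Int)-1) 0 * (mn:Int) else 0) ∘ (fun x => q + x))).sum = 0 := by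
    apply List.sum_eq_zero
    intro x hx
    simp only [List.mem_map, Function.comp] at hx
    obtain ⟨j, hj, rfl⟩ := hx
    apply if_neg
    have hcast2 : ((0:Int) + (mn:Int)*((q+j : Nat):Int) + (mn:Int)) = ((mn*(q+j) + mn : Nat) : Int) := by push_cast; ring
    have hcast : ((0:Int) + (mn:Int)*((q+j : Nat):Int)) = ((mn*(q+j) : Nat) : Int) := by push_cast; ring
    rw [hcast2, hcast, PySem.List.slice_natCast]
    have hmul : mn * q ≤ mn * (q + j) := Nat.mul_le_mul_left _ (by omega)
    simp only [List.length_take, List.length_drop]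
    intro hcontra
    have : min (mn*(q+j) + mn - mn*(q+j)) (N - mn*(q+j)) = mn := by exact_mod_cast hcontra
    omega
  rw [htail]
  simp only [zero_add, add_zero]
  rw [← List.sum_map_mul_left]
  apply congrArg
  apply List.map_congr_left
  intro t ht
  have htq : t < q := List.mem_range.mp ht
  have hmul : mn * (t+1) ≤ mn * q := Nat.mul_le_mul_left _ (by omega)
  have hle : mn * (t + 1) ≤ N := by omega
  have hmt : mn * (t + 1) = mn * t + mn := by ring
  have hcast2 : ((mn:Int)*((t : Nat):Int) + (mn:Int)) = ((mn*t + mn : Nat) : Int) := by push_cast; ring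
  have hcast : ((mn:Int)*((t : Nat):Int)) = ((mn*t : Nat) : Int) := by push_cast; ring
  rw [hcast2, hcast, PySem.List.slice_natCast]
  rw [if_pos]
  · rw [show ((mn:Int) - 1) = ((mn - 1 : Nat) : Int) by omega]
    rw [PySem.List.pyGetD_natCast]
    rw [Nat.add_sub_cancel_left]
    rw [pv_term_eq d mn t hmn hle]
    rw [mul_comm]
  · rw [Nat.add_sub_cancel_left]
    simp only [List.length_take, List.length_drop]
    have : min mn (N - mn*t) = mn := by omega
    rw [this]

-- the per-position sum B's run arithmetic computes: positions p, …, p+|L|-1, a position j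
-- contributes L[j-p] when it is the last slot of a full block (j < F and mn ∣ j+1)
def pvS (mn F : Nat) (L : List Int) (p : Nat) : Int :=
  ((List.range L.length).map (fun j => if p + j < F ∧ (p + j + 1) % mn = 0 then L.getD j 0 else 0)).sum

theorem pvS_nil (mn F p : Nat) : pvS mn F [] p = 0 := by simp [pvS]

theorem pvS_append (mn F : Nat) (L1 L2 : List Int) (p : Nat) :
    pvS mn F (L1 ++ L2) p = pvS mn F L1 p + pvS mn F L2 (p + L1.length) := by
  unfold pvS
  rw [List.length_append, List.range_add, List.map_append, List.sum_append, List.map_map]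
  congr 1
  · apply congrArg
    apply List.map_congr_left
    intro j hj
    have hj' : j < L1.length := List.mem_range.mp hj
    rw [List.getD_append _ _ _ _ hj']
  · apply congrArg
    apply List.map_congr_left
    intro j hj
    simp only [Function.comp]
    rw [List.getD_append_right _ _ _ _ (by omega), Nat.add_sub_cancel_left]
    have h1 : p + (L1.length + j) = p + L1.length + j := by omega
    rw [h1]

theorem pv_sum_ite_one (P : Nat → Prop) [DecidablePred P] (v : Int) (c : Nat) (l : List Nat)
    (hl : ∀ j ∈ l, j < c) :
    (l.map (fun j => if P j then (List.replicate c v).getD j 0 else 0)).sum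
      = v * ((l.countP (fun j => decide (P j)) : Nat) : Int) := by
  induction l with
  | nil => simp
  | cons x t ih =>
    rw [List.map_cons, List.sum_cons, List.countP_cons,
        ih (fun j hj => hl j (List.mem_cons_of_mem _ hj))]
    have hx : (List.replicate c v).getD x 0 = v := by
      rw [List.getD_eq_getElem _ _ (by simpa using hl x List.mem_cons_self), List.getElem_replicate]
    by_cases h : P x
    · simp only [if_pos h, hx, decide_eq_true h, if_pos rfl]
      push_cast
      ring
    · simp only [if_neg h, decide_eq_false h]
      push_cast
      ring

theorem pvS_replicate (mn F : Nat) (v : Int) (c p : Nat) :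
    pvS mn F (List.replicate c v) p
      = v * (((List.range c).countP (fun j => decide (p + j < F ∧ (p + j + 1) % mn = 0)) : Nat) : Int) := by
  unfold pvS
  rw [List.length_replicate]
  exact pv_sum_ite_one (fun j => p + j < F ∧ (p + j + 1) % mn = 0) v c (List.range c)
    (fun j hj => List.mem_range.mp hj)

-- counting the block-final positions among p, …, p+c-1 by floor division
theorem pv_countD (mn F : Nat) (hmn : 0 < mn) (p c : Nat) :
    (List.range c).countP (fun j => decide (p + j < F ∧ (p + j + 1) % mn = 0)) + p / mn
      = (max p (min (p + c) F)) / mn := by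
  induction c with
  | zero =>
    have h1 : max p (min (p + 0) F) = p := by omega
    simp [h1]
  | succ c ih =>
    rw [List.range_succ, List.countP_append, List.countP_cons, List.countP_nil]
    have h4 : ((p + c + 1) % mn = 0) ↔ mn ∣ p + c + 1 := by
      rw [Nat.dvd_iff_mod_eq_zero]
    by_cases hF : p + c < F
    · have h1 : max p (min (p + (c + 1)) F) = p + c + 1 := by omega
      have h2 : max p (min (p + c) F) = p + c := by omega
      rw [h1]
      rw [h2] at ih
      rw [show (p + c + 1) / mn = (p + c) / mn + if mn ∣ p + c + 1 then 1 else 0 from Nat.succ_div,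
          ← ih]
      by_cases hd : mn ∣ p + c + 1
      · rw [if_pos hd]
        have h5 : (decide (p + c < F ∧ (p + c + 1) % mn = 0)) = true := by
          simp [hF, h4, hd]
        rw [h5]
        simp
        omega
      · rw [if_neg hd]
        have h5 : (decide (p + c < F ∧ (p + c + 1) % mn = 0)) = false := by
          simp [h4, hd]
        rw [h5]
        simp
    · have h1 : max p (min (p + (c + 1)) F) = max p (min (p + c) F) := by omega
      have h5 : (decide (p + c < F ∧ (p + c + 1) % mn = 0)) = false := by
        simp [hF]
      rw [h1, h5]
      simpa using ih

-- B's fold over the distinct values with counts, started at position p, adds mn times the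
-- per-position sum of the corresponding run-length-expanded list
theorem pvB_fold (mn F : Nat) (hmn : 0 < mn) (c : Int → Nat) (ks : List Int) :
    ∀ (p : Nat) (ans : Int),
    ks.foldl (fun (st : Int × Int) v =>
        if st.2 < min (st.2 + ((c v : Nat) : Int)) ((F : Nat) : Int) then
          (st.1 + v * ((mn : Nat) : Int) *
              (PySem.Int.floordiv (min (st.2 + ((c v : Nat) : Int)) ((F : Nat) : Int)) ((mn : Nat) : Int)
                - PySem.Int.floordiv st.2 ((mn : Nat) : Int)),
           st.2 + ((c v : Nat) : Int))
        else (st.1, st.2 + ((c v : Nat) : Int))) (ans, (p : Int))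
    = (ans + ((mn : Nat) : Int) * pvS mn F (ks.flatMap (fun v => List.replicate (c v) v)) p,
       ((p + (ks.map c).sum : Nat) : Int)) := by
  induction ks with
  | nil => intro p ans; simp [pvS_nil]
  | cons v t ih =>
    intro p ans
    rw [List.foldl_cons]
    dsimp only
    have hnxt : (p : Int) + ((c v : Nat) : Int) = ((p + c v : Nat) : Int) := by push_cast; ring
    have he : min ((p + c v : Nat) : Int) ((F : Nat) : Int) = ((min (p + c v) F : Nat) : Int) :=
      (Nat.cast_min _ _).symm
    rw [hnxt, he]
    rw [List.flatMap_cons, pvS_append, pvS_replicate, List.length_replicate]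
    have hcnt := pv_countD mn F hmn p (c v)
    by_cases hpe : p < min (p + c v) F
    · rw [if_pos (by exact_mod_cast hpe)]
      rw [ih (p + c v)]
      have hdivle : p / mn ≤ (min (p + c v) F) / mn := Nat.div_le_div_right (le_of_lt hpe)
      rw [Nat.max_eq_right (le_of_lt hpe)] at hcnt
      rw [PySem.Int.floordiv_natCast, PySem.Int.floordiv_natCast]
      refine Prod.ext ?_ ?_
      · have hc' : ((((List.range (c v)).countP (fun j => decide (p + j < F ∧ (p + j + 1) % mn = 0)) : Nat)) : Int)
            = (((min (p + c v) F) / mn : Nat) : Int) - ((p / mn : Nat) : Int) := by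
          have hcnat : (List.range (c v)).countP (fun j => decide (p + j < F ∧ (p + j + 1) % mn = 0))
              = (min (p + c v) F) / mn - p / mn := by omega
          rw [hcnat, Nat.cast_sub hdivle]
        dsimp only
        rw [hc']
        ring
      · dsimp only
        rw [List.map_cons, List.sum_cons]
        congr 1
        omega
    · rw [if_neg (by
        intro hcon
        exact hpe (by exact_mod_cast hcon))]
      rw [ih (p + c v)]
      rw [Nat.max_eq_left (by omega)] at hcnt
      have hc0 : (List.range (c v)).countP (fun j => decide (p + j < F ∧ (p + j + 1) % mn = 0)) = 0 := by
        omega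
      refine Prod.ext ?_ ?_
      · dsimp only
        rw [hc0]
        push_cast
        ring
      · dsimp only
        rw [List.map_cons, List.sum_cons]
        congr 1
        omega

-- the distinct score values, sorted descending, are pairwise strictly decreasing
theorem pv_ks_pairwise (xs : List Int) :
    (PySem.List.sorted (PySem.Set.ofList xs) (fun x => x) true).Pairwise (fun a b => b < a) := by
  rw [pv_sorted_rev_eq_reverse, List.pairwise_reverse]
  exact PySem.List.sorted_ofList_pairwise_lt xs

-- expanding each distinct value to its multiplicity: occurrence counts
theorem pv_count_flat (xs ks : List Int) (hnd : ks.Nodup) (x : Int) :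
    (ks.flatMap (fun v => List.replicate (xs.count v) v)).count x
      = if x ∈ ks then xs.count x else 0 := by
  induction ks with
  | nil => simp
  | cons v t ih =>
    rw [List.flatMap_cons, List.count_append]
    have hv : v ∉ t := (List.nodup_cons.mp hnd).1
    rw [ih (List.nodup_cons.mp hnd).2]
    by_cases hx : x = v
    · subst hx
      rw [List.count_replicate_self, if_neg (fun h => hv h), if_pos List.mem_cons_self]
      omega
    · have hrep : (List.replicate (xs.count v) v).count x = 0 :=
        List.count_eq_zero.mpr (fun h => hx (List.eq_of_mem_replicate h))
      rw [hrep]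
      by_cases hxt : x ∈ t
      · rw [if_pos hxt, if_pos (List.mem_cons_of_mem _ hxt)]
        omega
      · rw [if_neg hxt, if_neg (by simp [hx, hxt])]

-- runs of a strictly decreasing value list, flattened, are sorted for the key -x
theorem pv_flat_pairwise (xs ks : List Int) (hks : ks.Pairwise (fun a b => b < a)) :
    (ks.flatMap (fun v => List.replicate (xs.count v) v)).Pairwise (fun a b : Int => -a ≤ -b) := by
  induction ks with
  | nil => simp
  | cons v t ih =>
    rw [List.flatMap_cons, List.pairwise_append]
    refine ⟨List.pairwise_replicate.mpr (Or.inr (le_refl _)),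
      ih (List.pairwise_cons.mp hks).2, ?_⟩
    intro a ha b hb
    have ha' : a = v := List.eq_of_mem_replicate ha
    obtain ⟨w, hw, hbw⟩ := List.mem_flatMap.mp hb
    have hb' : b = w := List.eq_of_mem_replicate hbw
    have hwv : w < v := (List.pairwise_cons.mp hks).1 w hw
    subst ha' hb'
    exact neg_le_neg (le_of_lt hwv)

-- the run-length expansion of the sorted distinct values IS the descending sort of score
theorem pv_flat_eq_sorted (xs : List Int) :
    (PySem.List.sorted (PySem.Set.ofList xs) (fun x => x) true).flatMap
        (fun v => List.replicate (xs.count v) v)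
      = PySem.List.sorted xs (fun x => x) true := by
  have hksnd : (PySem.List.sorted (PySem.Set.ofList xs) (fun x => x) true).Nodup :=
    ((PySem.List.sorted_perm (PySem.Set.ofList xs) _ true).symm).nodup (PySem.Set.nodup_ofList xs)
  have hmem : ∀ y : Int, y ∈ PySem.List.sorted (PySem.Set.ofList xs) (fun x => x) true ↔ y ∈ xs := by
    intro y
    rw [PySem.List.mem_sorted]
    exact PySem.Set.mem_ofList xs y
  have hperm : List.Perm ((PySem.List.sorted (PySem.Set.ofList xs) (fun x => x) true).flatMap
      (fun v => List.replicate (xs.count v) v)) xs := by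
    rw [List.perm_iff_count]
    intro x
    rw [pv_count_flat xs _ hksnd x]
    by_cases hx : x ∈ PySem.List.sorted (PySem.Set.ofList xs) (fun x => x) true
    · rw [if_pos hx]
    · rw [if_neg hx]
      have : x ∉ xs := fun h => hx ((hmem x).mpr h)
      exact (List.count_eq_zero.mpr this).symm
  refine PySem.List.eq_of_perm_of_pairwise_le_of_injective (fun x : Int => -x) neg_injective
    (hperm.trans (PySem.List.sorted_perm xs _ true).symm) ?_ ?_
  · exact pv_flat_pairwise xs _ (pv_ks_pairwise xs)
  · exact (PySem.List.sorted_pairwise_rev xs (fun x => x)).imp (fun h => neg_le_neg h)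

-- the per-position sum over the whole descending list collapses to the block-minimum sum
theorem pv_blocks_aux (d : List Int) (mn : Nat) (hmn : 0 < mn) (b : Nat) :
    ((List.range (b * mn)).map (fun j => if (j + 1) % mn = 0 then d.getD j 0 else 0)).sum
      = ((List.range b).map (fun t => d.getD (mn * t + (mn - 1)) 0)).sum := by
  induction b with
  | zero => simp
  | succ b ih =>
    rw [Nat.succ_mul, List.range_add, List.map_append, List.sum_append, ih,
        List.range_succ, List.map_append, List.sum_append, List.map_map]
    congr 1
    have hcongr : ∀ r ∈ List.range mn,
        ((fun j => if (j + 1) % mn = 0 then d.getD j 0 else 0) ∘ (fun x => b * mn + x)) r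
          = if r = mn - 1 then d.getD (b * mn + r) 0 else 0 := by
      intro r hr
      have hr' : r < mn := List.mem_range.mp hr
      simp only [Function.comp]
      have hmod : (b * mn + r + 1) % mn = (r + 1) % mn := by
        rw [show b * mn + r + 1 = (r + 1) + b * mn by omega]
        exact Nat.add_mul_mod_self_right (r + 1) b mn
      rw [hmod]
      by_cases hd : r = mn - 1
      · rw [if_pos (by rw [show r + 1 = mn by omega]; exact Nat.mod_self mn), if_pos hd]
      · rw [if_neg, if_neg hd]
        intro hcon
        have hdvd : mn ∣ r + 1 := (Nat.dvd_iff_mod_eq_zero).mpr hcon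
        have h1 : r + 1 = mn := Nat.le_antisymm (by omega) (Nat.le_of_dvd (by omega) hdvd)
        omega
    rw [List.map_congr_left hcongr]
    have hrange : List.range mn = List.range (mn - 1) ++ [mn - 1] := by
      conv_lhs => rw [show mn = (mn - 1) + 1 by omega]
      rw [List.range_succ]
    rw [hrange, List.map_append, List.sum_append]
    have hz : ((List.range (mn - 1)).map (fun r => if r = mn - 1 then d.getD (b * mn + r) 0 else 0)).sum = 0 := by
      apply List.sum_eq_zero
      intro x hx
      obtain ⟨r, hr, rfl⟩ := List.mem_map.mp hx
      have : r < mn - 1 := List.mem_range.mp hr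
      rw [if_neg (by omega)]
    rw [hz]
    simp only [List.map_cons, List.map_nil, List.sum_cons, List.sum_nil, zero_add, add_zero]
    rw [if_true, Nat.mul_comm b mn]

theorem pv_blocks_key (d : List Int) (mn : Nat) (hmn : 0 < mn) :
    ∀ (N F q : Nat), F = q * mn → q = N / mn → F ≤ N →
    ((List.range N).map (fun j => if j < F ∧ (j + 1) % mn = 0 then d.getD j 0 else 0)).sum
      = ((List.range q).map (fun t => d.getD (mn * t + (mn - 1)) 0)).sum := by
  intro N F q hF hq hFN
  rw [show N = F + (N - F) by omega, List.range_add, List.map_append, List.sum_append]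
  have htail : (((List.range (N - F)).map (F + ·)).map
      (fun j => if j < F ∧ (j + 1) % mn = 0 then d.getD j 0 else 0)).sum = 0 := by
    apply List.sum_eq_zero
    intro x hx
    obtain ⟨j, hj, rfl⟩ := List.mem_map.mp hx
    obtain ⟨i, hi, rfl⟩ := List.mem_map.mp hj
    rw [if_neg (by omega)]
  rw [htail, add_zero]
  have hhead : ∀ j ∈ List.range F,
      (if j < F ∧ (j + 1) % mn = 0 then d.getD j 0 else 0)
        = if (j + 1) % mn = 0 then d.getD j 0 else 0 := by
    intro j hj
    have : j < F := List.mem_range.mp hj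
    by_cases h : (j + 1) % mn = 0
    · rw [if_pos ⟨this, h⟩, if_pos h]
    · rw [if_neg (fun hc => h hc.2), if_neg h]
  rw [List.map_congr_left hhead, hF, show q * mn = mn * q by ring]
  rw [show mn * q = q * mn by ring]
  exact pv_blocks_aux d mn hmn q

theorem pv_blocks (d : List Int) (mn : Nat) (hmn : 0 < mn) (n : Nat) (hn : d.length = n) :
    pvS mn (n / mn * mn) d 0
      = ((List.range (n / mn)).map (fun t => d.getD (mn * t + (mn - 1)) 0)).sum := by
  unfold pvS
  rw [hn]
  simp only [Nat.zero_add]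
  exact pv_blocks_key d mn hmn n (n / mn * mn) (n / mn) rfl rfl (Nat.div_mul_le_self _ _)

-- ===== VERDICT (by name: the statement is the Claim_ definition above) =====
theorem solution_spec : Claim_equal_solution := by
  intro k m score _ hm
  unfold Spec_solution
  simp only [solution, solution_alt]
  rcases lt_or_gt_of_ne hm with hneg | hpos
  · rw [if_pos (le_of_lt hneg)]
    rw [show PySem.List.pyRange 0 (((PySem.List.sorted score (fun x => x) true).length : Nat) : Int) m = [] from by
      simp [PySem.List.pyRange, not_lt.mpr hneg.le, not_lt.mpr (Int.natCast_nonneg _)]]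
    simp
  · rw [if_neg (by omega)]
    obtain ⟨mn, rfl⟩ : ∃ mn : Nat, m = (mn : Nat) := ⟨m.toNat, (Int.toNat_of_nonneg hpos.le).symm⟩
    have hmn : 0 < mn := by exact_mod_cast hpos
    rw [PySem.Dict.foldl_insert_getD_add_one_eq_counter]
    simp only [PySem.Dict.keys_counter, PySem.Dict.getD_counter]
    have hfull : PySem.Int.floordiv ((score.length : Nat) : Int) ((mn : Nat) : Int) * ((mn : Nat) : Int)
        = ((score.length / mn * mn : Nat) : Int) := by
      rw [PySem.Int.floordiv_natCast]
      push_cast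
      ring
    rw [hfull]
    rw [show ((0 : Int), (0 : Int)) = (((0 : Int)), (((0 : Nat) : Int))) from by norm_num]
    rw [pvB_fold mn (score.length / mn * mn) hmn (fun v => score.count v)
          (PySem.List.sorted (PySem.Set.ofList score) (fun x => x) true) 0 0]
    rw [pv_flat_eq_sorted score]
    rw [pvA_sum (PySem.List.sorted score (fun x => x) true) mn hmn]
    rw [pv_blocks (PySem.List.sorted score (fun x => x) true) mn hmn score.length
          (PySem.List.length_sorted score (fun x => x) true)]
    rw [PySem.List.length_sorted]
    ring
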